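-- pv_equiv track=rewrite | github.com/MrCybernetic/AdventOfCode2023 | J1/j1.py | search_spelled_digits
-- ===== SOURCE A (Python) =====
-- DIGIT_SPELLED = ['one', 'two', 'three', 'four', 'five', 'six', 'seven', 'eight', 'nine']
--
-- def search_spelled_digits(text: str) -> list[int, int]:
--     spelled_digits_array = []
--     word_to_seach = DIGIT_SPELLED.copy()
--     while len(word_to_seach) > 0:
--         word = word_to_seach.pop(0)
--         start_index = 0
--         while True:
--             index = text.find(word, start_index)
--             if index == -1:
--                 break
--             else:
--                 spelled_digits_array.append([DIGIT_SPELLED.index(word) + 1, index])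
--                 start_index = index + len(word)
--     if len(spelled_digits_array) == 0:
--         return None
--     else:
--         return spelled_digits_array
-- ===== SOURCE B (Python) =====
-- DIGIT_SPELLED = ['one', 'two', 'three', 'four', 'five', 'six', 'seven', 'eight', 'nine']
--
-- def search_spelled_digits(text: str) -> list[int, int]:
--     buckets = [[] for _ in DIGIT_SPELLED]
--     for i in range(len(text)):
--         for d, word in enumerate(DIGIT_SPELLED):
--             if text.startswith(word, i):
--                 buckets[d].append([d + 1, i])
--     result = [pair for bucket in buckets for pair in bucket]
--     return result or None
-- ===== Notes on version B (the rewrite author's own statement) =====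
-- stated objective: alternative
-- what changed: Replaced the nine per-word repeated find-and-skip scans of the text with a single left-to-right pass over all positions that tests every digit word at each position and collects hits into per-word buckets, concatenated in word order at the end.
import Mathlib
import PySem

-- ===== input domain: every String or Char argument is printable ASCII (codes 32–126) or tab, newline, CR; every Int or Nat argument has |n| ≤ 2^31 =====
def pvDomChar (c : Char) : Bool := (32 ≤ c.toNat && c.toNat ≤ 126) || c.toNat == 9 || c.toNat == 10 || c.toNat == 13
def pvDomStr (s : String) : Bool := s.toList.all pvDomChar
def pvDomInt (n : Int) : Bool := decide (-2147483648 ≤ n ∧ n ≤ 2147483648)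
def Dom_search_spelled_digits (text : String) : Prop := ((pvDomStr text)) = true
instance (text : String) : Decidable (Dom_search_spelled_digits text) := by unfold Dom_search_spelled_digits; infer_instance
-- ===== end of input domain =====

-- B replaces A's nine repeated find-and-skip scans by one left-to-right pass over all
-- positions that tests every digit word at each position into per-word buckets
-- (same cost class; objective: alternative).


-- ===== PORT A =====
def pvWordsA : List String := ["one", "two", "three", "four", "five", "six", "seven", "eight", "nine"]

-- inner 'while True: index = text.find(word, start_index); …' loop of A.
-- fuel only makes the recursion structural (start strictly increases and is bounded
-- by the text length, so text.length + 1 steps always suffice).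
def pvFindLoopA (text : List Char) (word : List Char) (d : Int) :
    Nat → Nat → List (List Int) → List (List Int)
  | 0, _, acc => acc
  | fuel + 1, start, acc =>
    let idx := PySem.Chars.findFrom text word (start : Int)
    if idx = -1 then acc
    else pvFindLoopA text word d fuel (idx.toNat + word.length) (acc ++ [[d, idx]])

-- outer 'while len(word_to_seach) > 0: word = word_to_seach.pop(0) …' loop of A.
-- DIGIT_SPELLED.index(word) never raises here (every word is in the list), so the
-- .getD 0 default is never used.
def pvOuterA (text : List Char) : List String → List (List Int) → List (List Int)
  | [], acc => acc
  | w :: rest, acc =>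
    let d : Int := ((PySem.List.index? pvWordsA w).getD 0 : Nat)
    pvOuterA text rest (pvFindLoopA text w.toList (d + 1) (text.length + 1) 0 acc)

def search_spelled_digits (text : String) : Option (List (List Int)) :=
  let arr := pvOuterA text.toList pvWordsA []
  if arr.length = 0 then none else some arr

-- ===== PORT B =====
def pvWordsB : List String := ["one", "two", "three", "four", "five", "six", "seven", "eight", "nine"]

-- one position i: 'for d, word in enumerate(DIGIT_SPELLED): if text.startswith(word, i): buckets[d].append(…)'.
-- text.startswith(word, i) with 0 ≤ i is exactly 'word is a prefix of text[i:]'.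
def pvStepB (text : List Char) (i : Int) (buckets : List (List (List Int))) : List (List (List Int)) :=
  List.zipWith
    (fun (p : Int × String) b =>
      if PySem.Chars.startswith (text.drop i.toNat) p.2.toList then b ++ [[p.1 + 1, i]] else b)
    (PySem.List.enumerate pvWordsB 0) buckets

def search_spelled_digits_alt (text : String) : Option (List (List Int)) :=
  let buckets :=
    (PySem.List.pyRange 0 (text.toList.length : Int) 1).foldl
      (fun bs i => pvStepB text.toList i bs) (pvWordsB.map (fun _ => []))
  let result := buckets.flatten
  if result = [] then none else some result

-- ===== PRECONDITION & SPEC =====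
def Spec_search_spelled_digits (text : String) (out : Option (List (List Int))) : Prop := out = search_spelled_digits_alt text
instance (text : String) (out : Option (List (List Int))) : Decidable (Spec_search_spelled_digits text out) := by unfold Spec_search_spelled_digits; infer_instance

-- ===== CLAIM (what is proved, stated in full; the proofs are below) =====
def Claim_equal_search_spelled_digits : Prop := ∀ (text : String), Dom_search_spelled_digits text → Spec_search_spelled_digits text (search_spelled_digits text)

-- ===== LEMMAS AND PROOFS =====

-- canonical form both ports are reduced to: all hit positions of word w, in ascending order, tagged d
lemma pv_overlap {t w : List Char} {i j : Nat} (hj : w <+: t.drop j) (hi : w <+: t.drop i)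
    (hlt : j < i) (hcl : i < j + w.length) : w.drop (i - j) <+: w := by
  rw [List.prefix_iff_getElem?]
  intro k hk
  simp only [List.length_drop] at hk
  have hdk : i - j + k < w.length := by omega
  have hkw : k < w.length := by omega
  have h1 := hj.getElem hdk
  have h2 := hi.getElem hkw
  have hjl : w.length ≤ (List.drop j t).length := hj.length_le
  have hil : w.length ≤ (List.drop i t).length := hi.length_le
  simp only [List.length_drop] at hjl hil
  rw [List.getElem_drop] at h1 h2
  have : j + (i - j + k) = i + k := by omega
  rw [List.getElem_drop]
  rw [List.getElem?_eq_getElem hkw]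
  congr 1
  rw [h2, h1]
  simp [this]

lemma pv_filter_split (n j : Nat) (p q : Nat → Bool) (hj : j < n) (hpj : p j = true)
    (hlt : ∀ i, i < j → p i = false)
    (hgt : ∀ i, j < i → p i = q i)
    (hqle : ∀ i, i ≤ j → q i = false) :
    (List.range n).filter p = j :: (List.range n).filter q := by
  rw [List.range_eq_range']
  have hsplit : List.range' 0 n = List.range' 0 j ++ List.range' j (n - j) := by
    have h := List.range'_append (s := 0) (m := j) (n := n - j) (step := 1)
    simp only [Nat.zero_add, Nat.one_mul] at h
    rw [h]
    congr 1
    omega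
  have hcons : List.range' j (n - j) = j :: List.range' (j + 1) (n - j - 1) := by
    have : n - j = (n - j - 1) + 1 := by omega
    rw [this, List.range'_succ]
    simp
  have hlow_p : (List.range' 0 j).filter p = [] := by
    rw [List.filter_eq_nil_iff]
    intro a ha
    rw [List.mem_range'] at ha
    simp [hlt a (by omega)]
  have hlow_q : (List.range' 0 j).filter q = [] := by
    rw [List.filter_eq_nil_iff]
    intro a ha
    rw [List.mem_range'] at ha
    simp [hqle a (by omega)]
  have hcongr : (List.range' (j + 1) (n - j - 1)).filter p
      = (List.range' (j + 1) (n - j - 1)).filter q := by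
    apply List.filter_congr
    intro a ha
    rw [List.mem_range'] at ha
    exact hgt a (by omega)
  rw [hsplit, hcons, List.filter_append, List.filter_append, hlow_p, hlow_q,
    List.filter_cons_of_pos hpj, List.filter_cons_of_neg (by simp [hqle j le_rfl]), hcongr]
  simp

def pvSparse (w : List Char) : Prop := ∀ d, d < w.length → 0 < d → ¬ (w.drop d <+: w)

lemma pvFindLoopA_eq (text w : List Char) (d : Int) (hw : w ≠ []) (hsp : pvSparse w) :
    ∀ fuel start acc, text.length < fuel + start → start ≤ text.length →
      pvFindLoopA text w d fuel start acc
        = acc ++ (((List.range text.length).filter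
            (fun i => decide (start ≤ i) && PySem.Chars.startswith (text.drop i) w)).map
              (fun (i : Nat) => [d, (i : Int)])) := by
  intro fuel
  induction fuel with
  | zero => intro start acc h1 h2; omega
  | succ fuel ih =>
    intro start acc h1 h2
    rw [pvFindLoopA]
    by_cases hneg : PySem.Chars.findFrom text w (start : Int) = -1
    · rw [if_pos hneg]
      rw [PySem.Chars.findFrom_natCast_eq_neg_one_iff text w start h2] at hneg
      have hemp : ((List.range text.length).filter
          (fun i => decide (start ≤ i) && PySem.Chars.startswith (text.drop i) w)) = [] := by
        rw [List.filter_eq_nil_iff]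
        intro a _
        simp only [Bool.and_eq_true, decide_eq_true_eq, PySem.Chars.startswith_iff]
        rintro ⟨hsa, hpre⟩
        apply hneg
        have hdd : List.drop a text = List.drop (a - start) (List.drop start text) := by
          rw [List.drop_drop]; congr 1; omega
        exact (hpre.isInfix).trans (by rw [hdd]; exact (List.drop_suffix _ _).isInfix)
      rw [hemp]
      rw [List.map_nil, List.append_nil]
    · rw [if_neg hneg]
      obtain ⟨hge, hpre, hmin⟩ := PySem.Chars.findFrom_natCast_spec text w start h2 hneg
      set r := PySem.Chars.findFrom text w (start : Int) with hr
      have hr0 : 0 ≤ r := le_trans (by exact_mod_cast Int.natCast_nonneg start) hge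
      set j := r.toNat with hjdef
      have hstart_j : start ≤ j := by omega
      have hwlen : 0 < w.length := List.length_pos_iff.mpr hw
      have hlenle : w.length ≤ text.length - j := by
        have := hpre.length_le
        simpa using this
      have hjn : j < text.length := by omega
      have hjend : j + w.length ≤ text.length := by omega
      rw [ih (j + w.length) (acc ++ [[d, r]]) (by omega) (by omega)]
      rw [List.append_assoc]
      congr 1
      have hsplit := pv_filter_split text.length j
        (fun i => decide (start ≤ i) && PySem.Chars.startswith (text.drop i) w)
        (fun i => decide (j + w.length ≤ i) && PySem.Chars.startswith (text.drop i) w)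
        hjn
        (by simp only [Bool.and_eq_true, decide_eq_true_eq, PySem.Chars.startswith_iff]
            exact ⟨hstart_j, hpre⟩)
        (by intro i hij
            rw [Bool.eq_false_iff]
            simp only [ne_eq, Bool.and_eq_true, decide_eq_true_eq, PySem.Chars.startswith_iff]
            rintro ⟨h1', h2'⟩
            exact hmin i h1' hij h2')
        (by intro i hij
            by_cases hbig : j + w.length ≤ i
            · have hsi : start ≤ i := by omega
              simp [hsi, hbig]
            · have hb : PySem.Chars.startswith (List.drop i text) w = false := by
                rw [Bool.eq_false_iff, ne_eq, PySem.Chars.startswith_iff]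
                intro hpi
                have hov := pv_overlap hpre hpi hij (by omega)
                exact hsp (i - j) (by omega) (by omega) hov
              simp [hb])
        (by intro i hij
            have : ¬ (j + w.length ≤ i) := by omega
            simp [this])
      rw [hsplit]
      simp only [List.map_cons]
      have hrj : r = (j : Int) := by omega
      rw [hrj]
      simp

def pvHits (s : List Char) (w : List Char) (d : Int) : List (List Int) :=
  ((List.range s.length).filter (fun i => PySem.Chars.startswith (s.drop i) w)).map
    (fun (i : Nat) => [d, (i : Int)])

lemma pvA_word (s w : List Char) (hw : w ≠ []) (hsp : pvSparse w) (d : Int)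
    (acc : List (List Int)) :
    pvFindLoopA s w d (s.length + 1) 0 acc = acc ++ pvHits s w d := by
  rw [pvFindLoopA_eq s w d hw hsp (s.length + 1) 0 acc (by omega) (by omega)]
  simp [pvHits]

lemma pv_zipWith_zipWith {α β γ δ : Type} (f : α → γ → δ) (g : α → β → γ) :
    ∀ (ws : List α) (bs : List β),
      List.zipWith f ws (List.zipWith g ws bs) = List.zipWith (fun a b => f a (g a b)) ws bs := by
  intro ws
  induction ws with
  | nil => intro bs; simp
  | cons a ws ih =>
    intro bs
    cases bs with
    | nil => simp
    | cons b bs => simp [ih]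

lemma pv_zipWith_id {α β : Type} : ∀ (ws : List α) (bs : List β), bs.length ≤ ws.length →
    List.zipWith (fun _ b => b) ws bs = bs := by
  intro ws
  induction ws with
  | nil => intro bs h; simp at h ⊢; omega
  | cons a ws ih =>
    intro bs h
    cases bs with
    | nil => simp
    | cons b bs => simp only [List.zipWith_cons_cons]; rw [ih bs (by simpa using h)]

lemma pv_fold (t : List Char) (ws : List (Int × String)) :
    ∀ (ps : List Int) (bs : List (List (List Int))), bs.length ≤ ws.length →
      ps.foldl (fun bs i => List.zipWith
          (fun (p : Int × String) b =>
            if PySem.Chars.startswith (t.drop i.toNat) p.2.toList then b ++ [[p.1 + 1, i]] else b)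
          ws bs) bs
      = List.zipWith (fun p b => b ++
          (ps.filter (fun i => PySem.Chars.startswith (t.drop i.toNat) p.2.toList)).map
            (fun i => [p.1 + 1, i])) ws bs := by
  intro ps
  induction ps with
  | nil =>
    intro bs h
    simp only [List.foldl_nil, List.filter_nil, List.map_nil, List.append_nil]
    rw [pv_zipWith_id ws bs h]
  | cons i ps ih =>
    intro bs h
    rw [List.foldl_cons]
    rw [ih _ (by simp [List.length_zipWith])]
    rw [pv_zipWith_zipWith]
    have hfe : (fun (p : Int × String) (b : List (List Int)) =>
        (if PySem.Chars.startswith (t.drop i.toNat) p.2.toList then b ++ [[p.1 + 1, i]] else b) ++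
          (ps.filter (fun i => PySem.Chars.startswith (t.drop i.toNat) p.2.toList)).map
            (fun i => [p.1 + 1, i]))
      = (fun (p : Int × String) (b : List (List Int)) => b ++
          ((i :: ps).filter (fun i => PySem.Chars.startswith (t.drop i.toNat) p.2.toList)).map
            (fun i => [p.1 + 1, i])) := by
      funext p b
      rw [List.filter_cons]
      split_ifs with hc
      · simp
      · rfl
    rw [hfe]

lemma pv_bucket (s : List Char) (w : List Char) (d : Int) :
    ((PySem.List.pyRange 0 (s.length : Int) 1).filter
        (fun i => PySem.Chars.startswith (s.drop i.toNat) w)).map (fun i => [d, i])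
      = pvHits s w d := by
  rw [PySem.List.pyRange_one]
  rw [List.filter_map, List.map_map]
  unfold pvHits
  have hn : ((s.length : Int) - 0).toNat = s.length := by omega
  rw [hn]
  congr 1
  · funext k
    simp
  · congr 1
    funext k
    simp

lemma pvB_flat (s : List Char) :
    ((PySem.List.pyRange 0 (s.length : Int) 1).foldl
        (fun bs i => pvStepB s i bs) (pvWordsB.map (fun _ => []))).flatten
      = pvHits s "one".toList 1 ++ (pvHits s "two".toList 2 ++ (pvHits s "three".toList 3 ++
        (pvHits s "four".toList 4 ++ (pvHits s "five".toList 5 ++ (pvHits s "six".toList 6 ++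
        (pvHits s "seven".toList 7 ++ (pvHits s "eight".toList 8 ++ pvHits s "nine".toList 9))))))) := by
  simp only [pvStepB]
  rw [pv_fold s (PySem.List.enumerate pvWordsB 0) _ _ (by simp [pvWordsB, PySem.List.enumerate])]
  simp only [pvWordsB, PySem.List.enumerate_cons, PySem.List.enumerate_nil, List.map_cons,
    List.map_nil, List.zipWith_cons_cons, List.zipWith_nil_right, List.nil_append,
    List.flatten_cons, List.flatten_nil, List.append_nil]
  norm_num [pv_bucket]

lemma pvA_eq (s : List Char) : pvOuterA s pvWordsA [] =
    pvHits s "one".toList 1 ++ pvHits s "two".toList 2 ++ pvHits s "three".toList 3 ++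
    pvHits s "four".toList 4 ++ pvHits s "five".toList 5 ++ pvHits s "six".toList 6 ++
    pvHits s "seven".toList 7 ++ pvHits s "eight".toList 8 ++ pvHits s "nine".toList 9 := by
  simp only [pvWordsA, pvOuterA]
  norm_num
  rw [pvA_word s "one".toList (by decide) (by unfold pvSparse; decide),
      pvA_word s "two".toList (by decide) (by unfold pvSparse; decide),
      pvA_word s "three".toList (by decide) (by unfold pvSparse; decide),
      pvA_word s "four".toList (by decide) (by unfold pvSparse; decide),
      pvA_word s "five".toList (by decide) (by unfold pvSparse; decide),
      pvA_word s "six".toList (by decide) (by unfold pvSparse; decide),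
      pvA_word s "seven".toList (by decide) (by unfold pvSparse; decide),
      pvA_word s "eight".toList (by decide) (by unfold pvSparse; decide),
      pvA_word s "nine".toList (by decide) (by unfold pvSparse; decide)]
  simp only [show ((List.idxOf? "two" ["one", "two", "three", "four", "five", "six", "seven", "eight", "nine"]).getD 0) = 1 from by decide,
    show ((List.idxOf? "three" ["one", "two", "three", "four", "five", "six", "seven", "eight", "nine"]).getD 0) = 2 from by decide,
    show ((List.idxOf? "four" ["one", "two", "three", "four", "five", "six", "seven", "eight", "nine"]).getD 0) = 3 from by decide,
    show ((List.idxOf? "five" ["one", "two", "three", "four", "five", "six", "seven", "eight", "nine"]).getD 0) = 4 from by decide,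
    show ((List.idxOf? "six" ["one", "two", "three", "four", "five", "six", "seven", "eight", "nine"]).getD 0) = 5 from by decide,
    show ((List.idxOf? "seven" ["one", "two", "three", "four", "five", "six", "seven", "eight", "nine"]).getD 0) = 6 from by decide,
    show ((List.idxOf? "eight" ["one", "two", "three", "four", "five", "six", "seven", "eight", "nine"]).getD 0) = 7 from by decide,
    show ((List.idxOf? "nine" ["one", "two", "three", "four", "five", "six", "seven", "eight", "nine"]).getD 0) = 8 from by decide]
  norm_num [List.append_assoc]

-- ===== VERDICT (by name: the statement is the Claim_ definition above) =====
theorem search_spelled_digits_spec : Claim_equal_search_spelled_digits := by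
  intro text _
  unfold Spec_search_spelled_digits search_spelled_digits search_spelled_digits_alt
  simp only [pvA_eq, pvB_flat]
  simp [List.append_assoc, List.length_eq_zero_iff]
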